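-- pv_equiv track=rewrite | github.com/adamjacobs2/CacheAffinityProject | LMbench/lmbench_tests.py | parse_perf_stat
-- ===== SOURCE A (Python) =====
-- def parse_perf_stat(stderr_text):
--     """
--     Extract L1 cache loads and misses from perf stat output.
--     Ignores lines that are not numeric counters.
--     """
--     loads = misses = None
--     for line in stderr_text.splitlines():
--         line = line.strip()
--         if not line or not line[0].isdigit():
--             continue  # skip non-counter lines
--         parts = line.split()
--         if len(parts) < 2:
--             continue
--         count_str, event_name = parts[0], parts[1]
--         # remove commas from numbers
--         try:
--             count = int(count_str.replace(",", ""))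
--         except ValueError:
--             continue
--         if "L1-dcache-loads" in event_name:
--             loads = count
--         elif "L1-dcache-load-misses" in event_name:
--             misses = count
--     return loads, misses
-- ===== SOURCE B (Python) =====
-- def parse_perf_stat(stderr_text):
--     """
--     Extract L1 cache loads and misses from perf stat output.
--     Scans the lines back-to-front and stops at the first hit for each event
--     (equivalent to the forward last-match-wins scan).
--     """
--     lines = stderr_text.splitlines()
--
--     def counter(line):
--         line = line.strip()
--         if not line or not line[0].isdigit():
--             return None
--         parts = line.split()
--         if len(parts) < 2:
--             return None
--         try:
--             return int(parts[0].replace(",", "")), parts[1]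
--         except ValueError:
--             return None
--
--     def last_count(pred):
--         for line in reversed(lines):
--             c = counter(line)
--             if c is not None and pred(c[1]):
--                 return c[0]
--         return None
--
--     loads = last_count(lambda name: "L1-dcache-loads" in name)
--     misses = last_count(lambda name: "L1-dcache-load-misses" in name
--                         and "L1-dcache-loads" not in name)
--     return loads, misses
-- ===== Notes on version B (the rewrite author's own statement) =====
-- stated objective: alternative
-- what changed: Replaces A's single forward pass that mutates loads/misses accumulators with two independent backward scans over the lines (a shared per-line classifier plus a generic last-match search) that each stop at the first hit, which is the overall last match.
import Mathlib
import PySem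

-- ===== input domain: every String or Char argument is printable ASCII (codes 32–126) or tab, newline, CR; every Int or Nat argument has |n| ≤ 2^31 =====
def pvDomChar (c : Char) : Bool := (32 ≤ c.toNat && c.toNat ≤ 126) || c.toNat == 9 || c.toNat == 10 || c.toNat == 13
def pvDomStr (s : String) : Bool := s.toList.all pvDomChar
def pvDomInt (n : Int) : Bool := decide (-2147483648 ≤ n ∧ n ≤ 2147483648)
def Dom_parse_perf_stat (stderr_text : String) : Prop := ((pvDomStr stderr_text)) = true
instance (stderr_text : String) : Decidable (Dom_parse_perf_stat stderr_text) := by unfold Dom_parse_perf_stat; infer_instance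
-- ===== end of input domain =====

-- B replaces A's single forward pass with mutable loads/misses state by two independent
-- backward scans that stop at the first (= last overall) matching counter line (idiomatic; same cost).

-- ===== PORT A =====
-- loop body of A's for-line loop (state = (loads, misses))
def pvStepA (s : Option Int × Option Int) (line : String) : Option Int × Option Int :=
  let line := PySem.Str.strip line
  if line = "" then s
  else
    match PySem.Str.pyGet? line 0 with
    | none => s   -- unreachable: line nonempty (Python would raise on line[0] only if empty, guarded above)
    | some c =>
      if ¬ PySem.Chars.isdigit c then s
      else
        let parts := PySem.Str.split₀ line
        if parts.length < 2 then s
        else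
          match parts with
          | count_str :: event_name :: _ =>
            match PySem.Int.ofStr? (PySem.Str.replace count_str "," "") with
            | none => s   -- ValueError → continue
            | some count =>
              if PySem.Str.isIn "L1-dcache-loads" event_name then (some count, s.2)
              else if PySem.Str.isIn "L1-dcache-load-misses" event_name then (s.1, some count)
              else s
          | _ => s

def parse_perf_stat (stderr_text : String) : Option Int × Option Int :=
  (PySem.Str.splitlines stderr_text).foldl pvStepA (none, none)

-- ===== PORT B =====
-- B's helper `counter(line)`
def pvCounter? (line : String) : Option (Int × String) :=
  let line := PySem.Str.strip line
  if line = "" then none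
  else
    match PySem.Str.pyGet? line 0 with
    | none => none
    | some c =>
      if ¬ PySem.Chars.isdigit c then none
      else
        let parts := PySem.Str.split₀ line
        if parts.length < 2 then none
        else
          match parts with
          | count_str :: event_name :: _ =>
            match PySem.Int.ofStr? (PySem.Str.replace count_str "," "") with
            | none => none
            | some count => some (count, event_name)
          | _ => none

-- B's `last_count(pred)` loop over reversed(lines): first match wins
def pvLastCount (pred : String → Bool) : List String → Option Int
  | [] => none
  | line :: rest =>
    match pvCounter? line with
    | some (c, name) => if pred name then some c else pvLastCount pred rest
    | none => pvLastCount pred rest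

def pvPredLoads (name : String) : Bool := PySem.Str.isIn "L1-dcache-loads" name
def pvPredMisses (name : String) : Bool :=
  PySem.Str.isIn "L1-dcache-load-misses" name && !PySem.Str.isIn "L1-dcache-loads" name

def parse_perf_stat_alt (stderr_text : String) : Option Int × Option Int :=
  let lines := PySem.Str.splitlines stderr_text
  (pvLastCount pvPredLoads lines.reverse, pvLastCount pvPredMisses lines.reverse)

-- ===== PRECONDITION & SPEC =====
def Spec_parse_perf_stat (stderr_text : String) (out : Option Int × Option Int) : Prop := out = parse_perf_stat_alt stderr_text
instance (stderr_text : String) (out : Option Int × Option Int) : Decidable (Spec_parse_perf_stat stderr_text out) := by unfold Spec_parse_perf_stat; infer_instance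

-- ===== CLAIM (what is proved, stated in full; the proofs are below) =====
def Claim_equal_parse_perf_stat : Prop := ∀ (stderr_text : String), Dom_parse_perf_stat stderr_text → Spec_parse_perf_stat stderr_text (parse_perf_stat stderr_text)

-- ===== LEMMAS AND PROOFS =====

-- scanning a concatenation: the left part wins if it matches
theorem pvLastCount_append (p : String → Bool) (l₁ l₂ : List String) :
    pvLastCount p (l₁ ++ l₂) = (pvLastCount p l₁).or (pvLastCount p l₂) := by
  induction l₁ with
  | nil => simp [pvLastCount]
  | cons x xs ih =>
    simp only [List.cons_append, pvLastCount]
    cases h : pvCounter? x with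
    | none => simpa using ih
    | some v =>
      by_cases hp : p v.2 <;> simp [hp, ih, Option.or]

-- one line of A's loop, expressed through B's per-line classifier
theorem pvStepA_eq (s : Option Int × Option Int) (x : String) :
    pvStepA s x = ((pvLastCount pvPredLoads [x]).or s.1, (pvLastCount pvPredMisses [x]).or s.2) := by
  simp only [pvStepA, pvCounter?, pvLastCount, pvPredLoads, pvPredMisses]
  split
  · simp
  · split
    · simp
    · split
      · simp
      · split
        · simp
        · split
          · split
            · simp
            · split
              · simp_all [Option.or]
              · split
                · simp_all [Option.or]
                · simp_all [Option.or]
          · simp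

-- invariant of A's fold: last-match over the reversed prefix, falling back to the state
theorem pvFold_eq (ls : List String) :
    ∀ s : Option Int × Option Int,
      ls.foldl pvStepA s =
        ((pvLastCount pvPredLoads ls.reverse).or s.1, (pvLastCount pvPredMisses ls.reverse).or s.2) := by
  induction ls with
  | nil => intro s; simp [pvLastCount]
  | cons x xs ih =>
    intro s
    simp only [List.foldl_cons, ih, List.reverse_cons, pvLastCount_append, pvStepA_eq]
    cases hL : pvLastCount pvPredLoads xs.reverse <;>
      cases hM : pvLastCount pvPredMisses xs.reverse <;> simp [Option.or]

-- ===== VERDICT (by name: the statement is the Claim_ definition above) =====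
theorem parse_perf_stat_spec : Claim_equal_parse_perf_stat := by
  intro stderr_text _
  unfold Spec_parse_perf_stat parse_perf_stat parse_perf_stat_alt
  rw [pvFold_eq]
  cases hL : pvLastCount pvPredLoads (PySem.Str.splitlines stderr_text).reverse <;>
    cases hM : pvLastCount pvPredMisses (PySem.Str.splitlines stderr_text).reverse <;>
      simp [Option.or, hL, hM]
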